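-- pv_equiv track=rewrite | github.com/rebuilder945/FL_research | ast_research/python_code_5.23/lastterm_page7/success_code/周益辉-3225-2023-05-31_19_56_21.py | work
-- ===== SOURCE A (Python) =====
-- def work(a) :
--     dic={}
--     jie=1
--     for m in range(a+1):
--         for n in range(1,m+1):
--             jie=jie*n
--         dic[m]=jie
--         jie=1
--     return dic
-- ===== SOURCE B (Python) =====
-- def work(a):
--     dic = {0: 1} if a >= 0 else {}
--     fact = 1
--     for m in range(1, a + 1):
--         fact = fact * m
--         dic[m] = fact
--     return dic
-- ===== Notes on version B (the rewrite author's own statement) =====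
-- stated objective: faster
-- what changed: B keeps a running product updated once per step instead of A's inner loop that recomputes each factorial from scratch.
import Mathlib
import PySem

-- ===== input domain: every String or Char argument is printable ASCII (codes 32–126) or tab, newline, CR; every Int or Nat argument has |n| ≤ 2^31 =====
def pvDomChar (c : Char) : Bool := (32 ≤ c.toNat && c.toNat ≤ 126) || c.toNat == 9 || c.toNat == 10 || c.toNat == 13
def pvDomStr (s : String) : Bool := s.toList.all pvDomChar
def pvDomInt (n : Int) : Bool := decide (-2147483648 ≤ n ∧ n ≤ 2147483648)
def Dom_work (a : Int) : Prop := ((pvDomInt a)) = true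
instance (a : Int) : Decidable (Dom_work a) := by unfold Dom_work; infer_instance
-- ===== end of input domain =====

-- B replaces A's inner factorial-recomputation loop by a running product (one multiplication per key).

-- ===== PORT A =====
def work (a : Int) : List (Int × Int) :=
  let res := (PySem.List.pyRange 0 (a + 1) 1).foldl
    (fun (st : PySem.Dict Int Int × Int) m =>
      let jie := (PySem.List.pyRange 1 (m + 1) 1).foldl (fun j n => j * n) st.2
      (st.1.insert m jie, 1))
    (PySem.Dict.empty, 1)
  res.1.items

-- ===== PORT B =====
def work_alt (a : Int) : List (Int × Int) :=
  let dic : PySem.Dict Int Int :=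
    if a ≥ 0 then PySem.Dict.empty.insert 0 1 else PySem.Dict.empty
  let res := (PySem.List.pyRange 1 (a + 1) 1).foldl
    (fun (st : PySem.Dict Int Int × Int) m =>
      let fact := st.2 * m
      (st.1.insert m fact, fact))
    (dic, 1)
  res.1.items

-- ===== PRECONDITION & SPEC =====
def Spec_work (a : Int) (out : List (Int × Int)) : Prop := out = work_alt a
instance (a : Int) (out : List (Int × Int)) : Decidable (Spec_work a out) := by unfold Spec_work; infer_instance

-- ===== CLAIM (what is proved, stated in full; the proofs are below) =====
def Claim_equal_work : Prop := ∀ (a : Int), Dom_work a → Spec_work a (work a)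

-- ===== LEMMAS AND PROOFS =====

-- factorial as an Int, fct (n+1) = fct n * (n+1)
def fct : Nat → Int
  | 0 => 1
  | n + 1 => fct n * (n + 1)

-- the common result: [(0, 0!), (1, 1!), …, (n-1, (n-1)!)]
def model (n : Nat) : List (Int × Int) :=
  (List.range n).map (fun (k : Nat) => ((k : Int), fct k))

lemma model_succ (n : Nat) : model (n + 1) = model n ++ [((n : Int), fct n)] := by
  simp [model, List.range_succ]

lemma contains_model (n : Nat) :
    (PySem.Dict.mk (model n)).contains (n : Int) = false := by
  rw [PySem.Dict.contains_eq_decide_mem_keys]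
  rw [decide_eq_false_iff_not]
  intro h
  simp only [PySem.Dict.keys_mk, model, List.map_map, List.mem_map, Function.comp_apply,
    List.mem_range] at h
  obtain ⟨k, hk, hEq⟩ := h
  have : k = n := by exact_mod_cast hEq
  omega

lemma inner_fold (n : Nat) :
    (PySem.List.pyRange 1 ((n : Int) + 1) 1).foldl (fun j m => j * m) 1 = fct n := by
  induction n with
  | zero => simp [PySem.List.pyRange_one_eq_nil, fct]
  | succ k ih =>
    rw [show ((k + 1 : Nat) : Int) + 1 = ((k : Int) + 1) + 1 by push_cast; ring,
        PySem.List.pyRange_one_succ_right (by omega), List.foldl_append, ih]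
    simp only [List.foldl_cons, List.foldl_nil, fct]

lemma A_fold (n : Nat) :
    (PySem.List.pyRange 0 (n : Int) 1).foldl
      (fun (st : PySem.Dict Int Int × Int) m =>
        let jie := (PySem.List.pyRange 1 (m + 1) 1).foldl (fun j k => j * k) st.2
        (st.1.insert m jie, 1))
      (PySem.Dict.empty, 1)
      = (PySem.Dict.mk (model n), 1) := by
  induction n with
  | zero => simp [PySem.List.pyRange_one_eq_nil, model, PySem.Dict.empty]
  | succ k ih =>
    rw [show ((k + 1 : Nat) : Int) = (k : Int) + 1 by push_cast; ring,
        PySem.List.pyRange_one_succ_right (by omega), List.foldl_append, ih]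
    simp only [List.foldl_cons, List.foldl_nil]
    apply Prod.ext
    · apply PySem.Dict.ext
      show ((PySem.Dict.mk (model k)).insert (k : Int)
        ((PySem.List.pyRange 1 ((k : Int) + 1) 1).foldl (fun j m => j * m) 1)).items = _
      rw [PySem.Dict.items_insert_of_not_contains _ _ (contains_model k), inner_fold k]
      simp [model_succ]
    · rfl

lemma B_fold (n : Nat) :
    (PySem.List.pyRange 1 ((n : Int) + 1) 1).foldl
      (fun (st : PySem.Dict Int Int × Int) m =>
        let fact := st.2 * m
        (st.1.insert m fact, fact))
      (PySem.Dict.empty.insert 0 1, 1)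
      = (PySem.Dict.mk (model (n + 1)), fct n) := by
  induction n with
  | zero =>
    rw [PySem.List.pyRange_one_eq_nil (by omega)]
    simp only [List.foldl_nil, fct]
    apply Prod.ext
    · apply PySem.Dict.ext
      rw [PySem.Dict.items_insert_of_not_contains _ _ (by rfl)]
      simp [PySem.Dict.empty, model, fct]
    · rfl
  | succ k ih =>
    rw [show ((k + 1 : Nat) : Int) + 1 = ((k : Int) + 1) + 1 by push_cast; ring,
        PySem.List.pyRange_one_succ_right (by omega), List.foldl_append, ih]
    simp only [List.foldl_cons, List.foldl_nil]
    apply Prod.ext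
    · apply PySem.Dict.ext
      have hc := contains_model (k + 1)
      rw [show (((k : Nat) + 1 : Nat) : Int) = (k : Int) + 1 by push_cast; ring] at hc
      show ((PySem.Dict.mk (model (k + 1))).insert ((k : Int) + 1) (fct k * ((k : Int) + 1))).items = _
      rw [PySem.Dict.items_insert_of_not_contains _ _ hc, model_succ (k + 1)]
      simp only [fct]
      push_cast; ring_nf
    · show fct k * ((k : Int) + 1) = fct (k + 1)
      simp only [fct]

-- ===== VERDICT (by name: the statement is the Claim_ definition above) =====
theorem work_spec : Claim_equal_work := by
  intro a _
  unfold Spec_work work work_alt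
  by_cases ha : a ≥ 0
  · obtain ⟨k, rfl⟩ := Int.eq_ofNat_of_zero_le ha
    simp only [if_pos ha]
    rw [show ((k : Int) + 1) = ((k + 1 : Nat) : Int) by push_cast; ring] at *
    rw [A_fold (k + 1)]
    rw [show ((k + 1 : Nat) : Int) = ((k : Int) + 1) by push_cast; ring]
    rw [B_fold k]
  · simp only [if_neg ha]
    rw [PySem.List.pyRange_one_eq_nil (by omega), PySem.List.pyRange_one_eq_nil (by omega)]
    simp [PySem.Dict.empty]
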